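-- pv_equiv track=rewrite | github.com/johnp95/Leetcode | Programming Tutorials/Recursion3/maze.py | uniquePaths3
-- ===== SOURCE A (Python) =====
-- def uniquePaths3(r,c,curr=''):
--     if r == 1 and c ==1 :
--         return [curr]
--     ans = []
--     if r > 1:
--         ans += uniquePaths3(r-1,c,curr+'D')
--     if c > 1:
--         ans += uniquePaths3(r,c-1,curr+'R')
--     return ans
-- ===== SOURCE B (Python) =====
-- def uniquePaths3(r, c, curr=''):
--     # Bottom-up DP over grid sizes instead of recursion; builds suffixes and
--     # prefixes curr once at the end.
--     if r < 1 or c < 1: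
--         return []
--     prev = []
--     for i in range(1, r + 1):
--         row = []
--         for j in range(1, c + 1):
--             if i == 1 and j == 1:
--                 cell = ['']
--             else:
--                 cell = []
--                 if i > 1:
--                     cell += ['D' + p for p in prev[j - 1]]
--                 if j > 1:
--                     cell += ['R' + p for p in row[j - 2]]
--             row.append(cell)
--         prev = row
--     return [curr + p for p in prev[c - 1]]
-- ===== Notes on version B (the rewrite author's own statement) =====
-- stated objective: alternative
-- what changed: Replaces the top-down recursion threading a curr prefix with an iterative bottom-up dynamic-programming table over grid sizes that builds move-string suffixes and prefixes curr once at the end.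
import Mathlib
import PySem

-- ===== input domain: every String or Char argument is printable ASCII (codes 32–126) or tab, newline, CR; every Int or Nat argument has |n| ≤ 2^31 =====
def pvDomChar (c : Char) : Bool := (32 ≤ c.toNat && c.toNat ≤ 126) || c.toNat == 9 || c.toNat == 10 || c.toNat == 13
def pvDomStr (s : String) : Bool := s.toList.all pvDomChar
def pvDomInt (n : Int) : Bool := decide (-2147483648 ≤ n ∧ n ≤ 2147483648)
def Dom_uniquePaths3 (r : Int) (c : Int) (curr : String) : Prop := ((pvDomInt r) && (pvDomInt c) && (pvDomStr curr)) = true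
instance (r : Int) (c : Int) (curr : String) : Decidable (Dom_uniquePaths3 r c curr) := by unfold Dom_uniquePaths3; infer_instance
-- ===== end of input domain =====

-- B replaces A's prefix-threading recursion with an iterative bottom-up DP table of suffix lists (alternative decomposition, same output).

-- ===== PORT A =====
def uniquePaths3 (r : Int) (c : Int) (curr : String) : List String :=
  if r = 1 ∧ c = 1 then [curr]
  else
    (if r > 1 then uniquePaths3 (r - 1) c (curr ++ "D") else []) ++
    (if c > 1 then uniquePaths3 r (c - 1) (curr ++ "R") else [])
termination_by r.toNat + c.toNat
decreasing_by all_goals omega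

-- ===== PORT B =====
def uniquePaths3_alt (r : Int) (c : Int) (curr : String) : List String :=
  if r < 1 ∨ c < 1 then []
  else
    let prev := (PySem.List.pyRange 1 (r + 1) 1).foldl (fun prev i =>
      (PySem.List.pyRange 1 (c + 1) 1).foldl (fun row j =>
        row ++ [ if i = 1 ∧ j = 1 then [""]
                 else (if i > 1 then (PySem.List.pyGetD prev (j - 1) []).map (fun p => "D" ++ p) else []) ++
                      (if j > 1 then (PySem.List.pyGetD row (j - 2) []).map (fun p => "R" ++ p) else []) ]) []) []
    (PySem.List.pyGetD prev (c - 1) []).map (fun p => curr ++ p)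

-- ===== PRECONDITION & SPEC =====
-- Pre_ excludes inputs whose recursion depth max(r-1,0)+max(c-1,0) exceeds 900, on which Python A hits
-- CPython's default recursion limit and raises RecursionError (the 900 bound is slightly conservative
-- near the exact limit ~998, where A still returns).
def Pre_uniquePaths3 (r : Int) (c : Int) (curr : String) : Prop := max (r - 1) 0 + max (c - 1) 0 ≤ 900
instance (r : Int) (c : Int) (curr : String) : Decidable (Pre_uniquePaths3 r c curr) := by unfold Pre_uniquePaths3; infer_instance
def pvWitness_uniquePaths3 : Int × Int × String := (3, 3, "")

def Spec_uniquePaths3 (r : Int) (c : Int) (curr : String) (out : List String) : Prop := out = uniquePaths3_alt r c curr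
instance (r : Int) (c : Int) (curr : String) (out : List String) : Decidable (Spec_uniquePaths3 r c curr out) := by unfold Spec_uniquePaths3; infer_instance

-- ===== CLAIM (what is proved, stated in full; the proofs are below) =====
def Claim_equal_uniquePaths3 : Prop := ∀ (r : Int) (c : Int) (curr : String), Dom_uniquePaths3 r c curr → Pre_uniquePaths3 r c curr → Spec_uniquePaths3 r c curr (uniquePaths3 r c curr)

-- ===== LEMMAS AND PROOFS =====

-- A returns [] as soon as one dimension is below 1
theorem uniquePaths3_nil : ∀ (n : Nat) (r c : Int) (curr : String), r.toNat + c.toNat = n →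
    r < 1 ∨ c < 1 → uniquePaths3 r c curr = [] := by
  intro n
  induction n using Nat.strong_induction_on with
  | _ n ih =>
    intro r c curr hn h
    rw [uniquePaths3]
    have h1 : ¬ (r = 1 ∧ c = 1) := by omega
    simp only [h1, if_false]
    rcases h with h | h
    · have : ¬ r > 1 := by omega
      simp only [this, if_false, List.nil_append]
      split_ifs with hc
      · exact ih (r.toNat + (c-1).toNat) (by omega) r (c-1) _ rfl (by omega)
      · rfl
    · have : ¬ c > 1 := by omega
      simp only [this, if_false, List.append_nil]
      split_ifs with hr
      · exact ih ((r-1).toNat + c.toNat) (by omega) (r-1) c _ rfl (by omega)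
      · rfl

-- A only prepends curr to what it computes from the empty prefix
theorem uniquePaths3_prefix : ∀ (n : Nat) (r c : Int) (curr : String), r.toNat + c.toNat = n →
    uniquePaths3 r c curr = (uniquePaths3 r c "").map (fun p => curr ++ p) := by
  intro n
  induction n using Nat.strong_induction_on with
  | _ n ih =>
    intro r c curr hn
    conv_lhs => rw [uniquePaths3]
    conv_rhs => rw [uniquePaths3]
    split_ifs with h1 hr hc hc
    · simp
    · -- r > 1 and c > 1
      rw [ih ((r-1).toNat + c.toNat) (by omega) (r-1) c (curr ++ "D") rfl,
          ih ((r-1).toNat + c.toNat) (by omega) (r-1) c ("" ++ "D") rfl,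
          ih (r.toNat + (c-1).toNat) (by omega) r (c-1) (curr ++ "R") rfl,
          ih (r.toNat + (c-1).toNat) (by omega) r (c-1) ("" ++ "R") rfl]
      simp [List.map_map, Function.comp_def, String.append_assoc]
    · rw [ih ((r-1).toNat + c.toNat) (by omega) (r-1) c (curr ++ "D") rfl,
          ih ((r-1).toNat + c.toNat) (by omega) (r-1) c ("" ++ "D") rfl]
      simp [List.map_map, Function.comp_def, String.append_assoc]
    · rw [ih (r.toNat + (c-1).toNat) (by omega) r (c-1) (curr ++ "R") rfl,
          ih (r.toNat + (c-1).toNat) (by omega) r (c-1) ("" ++ "R") rfl]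
      simp [List.map_map, Function.comp_def, String.append_assoc]
    · simp

-- the DP cell recurrence satisfied by A's value at the empty prefix
theorem uniquePaths3_cell (i j : Int) :
    uniquePaths3 i j "" =
      if i = 1 ∧ j = 1 then [""]
      else (if i > 1 then (uniquePaths3 (i-1) j "").map (fun p => "D" ++ p) else []) ++
           (if j > 1 then (uniquePaths3 i (j-1) "").map (fun p => "R" ++ p) else []) := by
  conv_lhs => rw [uniquePaths3]
  split_ifs with h1 hr hc hc <;>
    simp only [uniquePaths3_prefix ((i-1).toNat + j.toNat) (i-1) j ("" ++ "D") rfl,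
        uniquePaths3_prefix (i.toNat + (j-1).toNat) i (j-1) ("" ++ "R") rfl] <;>
    simp

-- the row a size i produces in B, as a comprehension of A's base values
def pvRowSpec (c i : Int) : List (List String) :=
  (PySem.List.pyRange 1 (c + 1) 1).map (fun j => uniquePaths3 i j "")

theorem inner_fold (c i : Int) (_hi : 1 ≤ i) (prevL : List (List String))
    (hprev : 1 < i → prevL = pvRowSpec c (i - 1)) :
    ∀ (mk : Nat), (mk : Int) ≤ c →
      (PySem.List.pyRange 1 ((mk : Int) + 1) 1).foldl (fun row j =>
        row ++ [ if i = 1 ∧ j = 1 then [""]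
                 else (if i > 1 then (PySem.List.pyGetD prevL (j - 1) []).map (fun p => "D" ++ p) else []) ++
                      (if j > 1 then (PySem.List.pyGetD row (j - 2) []).map (fun p => "R" ++ p) else []) ]) []
      = (PySem.List.pyRange 1 ((mk : Int) + 1) 1).map (fun j => uniquePaths3 i j "") := by
  intro mk
  induction mk with
  | zero => intro _; simp [PySem.List.pyRange_one_eq_nil]
  | succ m ihm =>
    intro hm
    push_cast at hm ⊢
    rw [PySem.List.pyRange_one_succ_right (a := 1) (b := (m : Int) + 1) (by omega),
        List.foldl_append, List.map_append, ihm (by omega)]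
    simp only [List.foldl_cons, List.foldl_nil, List.map_cons, List.map_nil]
    congr 1
    congr 1
    rw [uniquePaths3_cell i ((m : Int) + 1)]
    by_cases h1 : i = 1 ∧ (m : Int) + 1 = 1
    · simp [h1]
    · simp only [h1, if_false]
      congr 1
      · split_ifs with hgt
        · have hk : (m : Nat) < ((c + 1) - 1).toNat := by omega
          have hlook : PySem.List.pyGetD prevL ((m : Int) + 1 - 1) [] = uniquePaths3 (i - 1) (1 + ((m : Nat) : Int)) "" := by
            rw [hprev hgt]
            unfold pvRowSpec
            rw [show ((m : Int) + 1 - 1) = ((m : Nat) : Int) by ring]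
            exact PySem.List.pyGetD_map_pyRange_one _ 1 (c + 1) m [] hk
          rw [hlook, show ((1 : Int) + ((m : Nat) : Int)) = (m : Int) + 1 by ring]
        · rfl
      · split_ifs with hgt
        · have hm1 : 1 ≤ (m : Int) := by omega
          have hk : ((m : Nat) - 1) < (((m : Int) + 1) - 1).toNat := by omega
          have hlook : PySem.List.pyGetD ((PySem.List.pyRange 1 ((m : Int) + 1) 1).map (fun j => uniquePaths3 i j ""))
                   ((m : Int) + 1 - 2) [] = uniquePaths3 i (1 + (((m : Nat) - 1 : Nat) : Int)) "" := by
            rw [show ((m : Int) + 1 - 2) = (((m : Nat) - 1 : Nat) : Int) by push_cast [Nat.cast_sub (by omega : 1 ≤ m)]; ring]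
            exact PySem.List.pyGetD_map_pyRange_one _ 1 ((m : Int) + 1) _ [] hk
          rw [hlook, show ((1 : Int) + (((m : Nat) - 1 : Nat) : Int)) = (m : Int) + 1 - 1 by push_cast [Nat.cast_sub (by omega : 1 ≤ m)]; ring]
        · rfl

theorem outer_fold (c : Int) : ∀ (k : Nat), 0 ≤ c →
    (PySem.List.pyRange 1 (((k : Int) + 1) + 1) 1).foldl (fun prev i =>
      (PySem.List.pyRange 1 (c + 1) 1).foldl (fun row j =>
        row ++ [ if i = 1 ∧ j = 1 then [""]
                 else (if i > 1 then (PySem.List.pyGetD prev (j - 1) []).map (fun p => "D" ++ p) else []) ++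
                      (if j > 1 then (PySem.List.pyGetD row (j - 2) []).map (fun p => "R" ++ p) else []) ]) []) []
    = pvRowSpec c ((k : Int) + 1) := by
  intro k
  induction k with
  | zero =>
    intro hc
    simp only [Nat.cast_zero, zero_add]
    rw [PySem.List.pyRange_one_singleton]
    simp only [List.foldl_cons, List.foldl_nil]
    have hc' := inner_fold c 1 le_rfl [] (by intro h; exact absurd h (by omega)) c.toNat (by omega)
    rw [Int.toNat_of_nonneg hc] at hc'
    simpa [pvRowSpec] using hc'
  | succ k ihk =>
    intro hc
    push_cast
    rw [PySem.List.pyRange_one_succ_right (a := 1) (b := (k : Int) + 1 + 1) (by omega),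
        List.foldl_append, ihk hc]
    simp only [List.foldl_cons, List.foldl_nil]
    have hc' := inner_fold c ((k : Int) + 1 + 1) (by omega) (pvRowSpec c ((k : Int) + 1))
      (by intro _; rw [show (k : Int) + 1 + 1 - 1 = (k : Int) + 1 by ring]) c.toNat (by omega)
    rw [Int.toNat_of_nonneg hc] at hc'
    simpa [pvRowSpec] using hc'

-- ===== VERDICT (by name: the statement is the Claim_ definition above) =====
theorem uniquePaths3_spec : Claim_equal_uniquePaths3 := by
  intro r c curr _ _
  unfold Spec_uniquePaths3 uniquePaths3_alt
  by_cases h : r < 1 ∨ c < 1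
  · simp only [h, if_true]
    exact uniquePaths3_nil (r.toNat + c.toNat) r c curr rfl h
  · simp only [h, if_false]
    push Not at h
    obtain ⟨hr, hc⟩ := h
    have houter := outer_fold c (r - 1).toNat (by omega)
    rw [show (((r - 1).toNat : Int) + 1) = r by omega] at houter
    rw [houter]
    have hk : (c - 1).toNat < ((c + 1) - 1).toNat := by omega
    have hget : PySem.List.pyGetD (pvRowSpec c r) (c - 1) [] = uniquePaths3 r (1 + (((c - 1).toNat : Nat) : Int)) "" := by
      unfold pvRowSpec
      rw [show (c - 1) = (((c - 1).toNat : Nat) : Int) by omega]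
      exact PySem.List.pyGetD_map_pyRange_one _ 1 (c + 1) _ [] hk
    rw [hget, show ((1 : Int) + (((c - 1).toNat : Nat) : Int)) = c by omega]
    exact uniquePaths3_prefix (r.toNat + c.toNat) r c curr rfl
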